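-- pv_equiv track=rewrite | github.com/Sam-Osian/PFD-toolkit | scripts/update_theme_collections.py | _chunk_theme_map
-- ===== SOURCE A (Python) =====
-- import math
--
-- def _chunk_theme_map(themes: dict[str, str], batches: int) -> list[dict[str, str]]:
--     if batches <= 0:
--         raise ValueError("--theme-batches must be at least 1.")
--     items = list(themes.items())
--     if not items:
--         return []
--     batch_size = max(1, math.ceil(len(items) / batches))
--     chunks: list[dict[str, str]] = []
--     for start in range(0, len(items), batch_size):
--         chunk_items = items[start : start + batch_size]
--         chunks.append(dict(chunk_items))
--     return chunks
-- ===== SOURCE B (Python) =====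
-- import math
--
-- def _chunk_theme_map(themes: dict[str, str], batches: int) -> list[dict[str, str]]:
--     if batches <= 0:
--         raise ValueError("--theme-batches must be at least 1.")
--     items = list(themes.items())
--     if not items:
--         return []
--     batch_size = max(1, math.ceil(len(items) / batches))
--     chunks: list[dict[str, str]] = []
--     buf: dict[str, str] = {}
--     for k, v in items:
--         buf[k] = v
--         if len(buf) == batch_size:
--             chunks.append(buf)
--             buf = {}
--     if buf:
--         chunks.append(buf)
--     return chunks
-- ===== Notes on version B (the rewrite author's own statement) =====
-- stated objective: alternative
-- what changed: Replaces the stride-range-and-slice loop (compute start indices, slice items[start:start+batch_size] each time) by a single per-element pass that fills a running buffer dict and flushes it whenever it reaches batch_size, appending the non-empty trailing buffer at the end.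
import Mathlib
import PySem

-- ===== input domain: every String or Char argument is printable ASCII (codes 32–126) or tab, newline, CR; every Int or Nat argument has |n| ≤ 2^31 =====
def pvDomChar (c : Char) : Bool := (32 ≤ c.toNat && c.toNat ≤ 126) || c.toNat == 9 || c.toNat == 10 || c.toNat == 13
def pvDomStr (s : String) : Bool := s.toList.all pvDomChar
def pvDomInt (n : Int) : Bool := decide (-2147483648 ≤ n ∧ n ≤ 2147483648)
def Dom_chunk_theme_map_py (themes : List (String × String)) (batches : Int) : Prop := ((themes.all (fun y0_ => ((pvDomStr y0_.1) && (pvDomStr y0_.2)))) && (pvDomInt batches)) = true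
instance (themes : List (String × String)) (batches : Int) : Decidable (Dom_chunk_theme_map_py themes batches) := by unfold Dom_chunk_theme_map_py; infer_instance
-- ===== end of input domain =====

-- B replaces A's stride-range-and-slice chunking by a single per-element pass with a
-- running buffer that is flushed each time it reaches batch_size (objective: alternative
-- decomposition, same cost).


-- ===== PORT A =====
-- Transliteration of A.  `themes` is the dict's items in insertion order (unique keys),
-- so `list(themes.items())` is `themes` and `dict(chunk_items)` is the chunk list itself.
-- `math.ceil(len(items) / batches)` is ported as the exact integer ceiling
-- `-((-len) // batches)` (exact for the sizes the float can represent exactly).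
-- Where A raises ValueError (batches <= 0) the port returns [] — excluded by Pre_.
def chunk_theme_map_py (themes : List (String × String)) (batches : Int) : List (List (String × String)) :=
  if batches ≤ 0 then []
  else
    let items := themes
    if items = [] then []
    else
      let batch_size : Int := max 1 (-(PySem.Int.floordiv (-(items.length : Int)) batches))
      (PySem.List.pyRange 0 (items.length : Int) batch_size).foldl
        (fun chunks start => chunks ++ [PySem.List.slice items (some start) (some (start + batch_size))])
        []

-- ===== PORT B =====
-- Transliteration of Source B: one pass over the items, accumulating a buffer that is
-- flushed whenever its length reaches batch_size; a non-empty trailing buffer is kept.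
def chunk_theme_map_py_alt (themes : List (String × String)) (batches : Int) : List (List (String × String)) :=
  if batches ≤ 0 then []
  else
    let items := themes
    if items = [] then []
    else
      let batch_size : Int := max 1 (-(PySem.Int.floordiv (-(items.length : Int)) batches))
      let st := items.foldl
        (fun (s : List (List (String × String)) × List (String × String)) kv =>
          let buf := s.2 ++ [kv]
          if (buf.length : Int) = batch_size then (s.1 ++ [buf], []) else (s.1, buf))
        ([], [])
      if st.2 = [] then st.1 else st.1 ++ [st.2]

-- ===== PRECONDITION & SPEC =====
-- A raises ValueError when batches <= 0; Pre_ excludes exactly those inputs.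
def Pre_chunk_theme_map_py (themes : List (String × String)) (batches : Int) : Prop := 1 ≤ batches
instance (themes : List (String × String)) (batches : Int) : Decidable (Pre_chunk_theme_map_py themes batches) := by unfold Pre_chunk_theme_map_py; infer_instance
def pvWitness_chunk_theme_map_py : (List (String × String)) × Int := ([("a", "x"), ("b", "y"), ("c", "z")], 2)

def Spec_chunk_theme_map_py (themes : List (String × String)) (batches : Int) (out : List (List (String × String))) : Prop := out = chunk_theme_map_py_alt themes batches
instance (themes : List (String × String)) (batches : Int) (out : List (List (String × String))) : Decidable (Spec_chunk_theme_map_py themes batches out) := by unfold Spec_chunk_theme_map_py; infer_instance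

-- ===== CLAIM (what is proved, stated in full; the proofs are below) =====
def Claim_equal_chunk_theme_map_py : Prop := ∀ (themes : List (String × String)) (batches : Int), Dom_chunk_theme_map_py themes batches → Pre_chunk_theme_map_py themes batches → Spec_chunk_theme_map_py themes batches (chunk_theme_map_py themes batches)

-- ===== LEMMAS AND PROOFS =====

-- Reference chunking: take m, recurse on drop (max 1 m).
def pvChunks (m : Nat) (xs : List (String × String)) : List (List (String × String)) :=
  if h : xs = [] then [] else xs.take m :: pvChunks m (xs.drop (max 1 m))
termination_by xs.length
decreasing_by
  simp only [List.length_drop]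
  have : xs.length ≠ 0 := fun hh => h (List.eq_nil_of_length_eq_zero hh)
  omega

lemma pvChunks_nil (m : Nat) : pvChunks m [] = [] := by rw [pvChunks]; simp

lemma pvChunks_cons (m : Nat) (hm : 1 ≤ m) (xs : List (String × String)) (hx : xs ≠ []) :
    pvChunks m xs = xs.take m :: pvChunks m (xs.drop m) := by
  rw [pvChunks]
  simp [hx, Nat.max_eq_right hm]

lemma pv_foldl_append_map {α β : Type} (f : α → β) (xs : List α) :
    ∀ acc : List β, xs.foldl (fun a x => a ++ [f x]) acc = acc ++ xs.map f := by
  induction xs with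
  | nil => intro acc; simp
  | cons x xs ih => intro acc; simp [List.foldl_cons, ih]

lemma pv_cnt_succ (m n : Nat) (hm : 1 ≤ m) (hn : 1 ≤ n) :
    (n + m - 1) / m = ((n - m) + m - 1) / m + 1 := by
  rcases Nat.lt_or_ge m n with h | h
  · have e1 : n + m - 1 = (n - 1 - m) + m + m := by omega
    have e2 : n - m + m - 1 = (n - 1 - m) + m := by omega
    rw [e1, e2, Nat.add_div_right _ (by omega)]
  · have h0 : n - m = 0 := by omega
    have e1 : n + m - 1 = (n - 1) + m := by omega
    rw [h0, e1, Nat.add_div_right _ (by omega), Nat.div_eq_of_lt (by omega),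
        Nat.div_eq_of_lt (by omega)]

-- A's range-of-starts chunks are the reference chunks.
lemma pv_sliceChunks (m : Nat) (hm : 1 ≤ m) :
    ∀ (n : Nat) (items : List (String × String)), items.length = n →
      (List.range ((items.length + m - 1) / m)).map
          (fun k => (items.drop (m * k)).take m) = pvChunks m items := by
  intro n
  induction n using Nat.strong_induction_on with
  | _ n ih =>
    intro items hlen
    rcases eq_or_ne items [] with rfl | hx
    · have h0 : (0 + m - 1) / m = 0 := Nat.div_eq_of_lt (by omega)
      simp only [List.length_nil, h0, List.range_zero, List.map_nil, pvChunks_nil]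
    · have hn : 1 ≤ items.length := by
        have := List.length_pos_iff.mpr hx; omega
      rw [pv_cnt_succ m items.length hm hn, List.range_succ_eq_map]
      have hdroplen : (items.drop m).length = items.length - m := by simp
      have htail := ih (items.length - m) (by omega) (items.drop m) hdroplen
      rw [pvChunks_cons m hm items hx]
      simp only [List.map_cons, List.map_map, Nat.mul_zero, List.drop_zero]
      refine congrArg₂ _ rfl ?_
      rw [← htail, hdroplen]
      refine List.map_congr_left ?_
      intro k _
      simp only [Function.comp_apply, List.drop_drop, Nat.mul_succ, Nat.add_comm]

-- B's buffer fold produces the reference chunks.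
lemma pv_bufFold (m : Nat) (hm : 1 ≤ m) :
    ∀ (xs : List (String × String)) (acc : List (List (String × String)))
      (buf : List (String × String)), buf.length < m →
      (let st := xs.foldl
          (fun (s : List (List (String × String)) × List (String × String)) kv =>
            let b := s.2 ++ [kv]
            if (b.length : Int) = (m : Int) then (s.1 ++ [b], []) else (s.1, b))
          (acc, buf)
       if st.2 = [] then st.1 else st.1 ++ [st.2]) = acc ++ pvChunks m (buf ++ xs) := by
  intro xs
  induction xs with
  | nil =>
    intro acc buf hbuf
    simp only [List.foldl_nil, List.append_nil]
    rcases eq_or_ne buf [] with rfl | hb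
    · simp [pvChunks_nil]
    · rw [pvChunks_cons m hm buf hb, List.take_of_length_le (by omega),
          List.drop_eq_nil_of_le (by omega), pvChunks_nil]
      simp [hb]
  | cons x xs ih =>
    intro acc buf hbuf
    simp only [List.foldl_cons]
    by_cases hfull : ((buf ++ [x]).length : Int) = (m : Int)
    · have hlen : (buf ++ [x]).length = m := by exact_mod_cast hfull
      rw [if_pos hfull]
      have := ih (acc ++ [buf ++ [x]]) [] (by simpa using hm)
      simp only [List.nil_append] at this
      rw [this]
      have hsplit : buf ++ x :: xs = (buf ++ [x]) ++ xs := by simp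
      rw [hsplit, pvChunks_cons m hm ((buf ++ [x]) ++ xs) (by simp),
          List.take_append_of_le_length (by omega), List.take_of_length_le (by omega),
          List.drop_append_of_le_length (by omega), List.drop_eq_nil_of_le (by omega)]
      simp
    · have hlt : (buf ++ [x]).length < m := by
        have : (buf ++ [x]).length ≠ m := fun hh => hfull (by exact_mod_cast hh)
        simp only [List.length_append, List.length_cons, List.length_nil] at this ⊢
        omega
      rw [if_neg hfull]
      have := ih acc (buf ++ [x]) hlt
      rw [this]
      simp

-- ===== VERDICT (by name: the statement is the Claim_ definition above) =====
theorem chunk_theme_map_py_spec : Claim_equal_chunk_theme_map_py := by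
  intro themes batches _ hpre
  unfold Spec_chunk_theme_map_py chunk_theme_map_py chunk_theme_map_py_alt
  have hb : ¬ batches ≤ 0 := by unfold Pre_chunk_theme_map_py at hpre; omega
  rw [if_neg hb, if_neg hb]
  rcases eq_or_ne themes [] with rfl | hx
  · simp
  · simp only [if_neg hx]
    set bs : Int := max 1 (-(PySem.Int.floordiv (-(themes.length : Int)) batches)) with hbs
    have hbs1 : 1 ≤ bs := le_max_left _ _
    set m : Nat := bs.toNat with hmdef
    have hm1 : 1 ≤ m := by omega
    have hbsm : bs = (m : Int) := by omega
    have hn : 1 ≤ themes.length := by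
      have := List.length_pos_iff.mpr hx; omega
    -- A side: range of starts, then slices
    rw [pv_foldl_append_map, PySem.List.pyRange_of_pos 0 (themes.length : Int) (by omega)]
    rw [if_pos (by exact_mod_cast hn)]
    have hcnt : (((themes.length : Int) - 0 + bs - 1) / bs).toNat
        = (themes.length + m - 1) / m := by
      rw [hbsm]
      have : ((themes.length : Int) - 0 + (m : Int) - 1) = ((themes.length + m - 1 : Nat) : Int) := by
        omega
      rw [this, ← Int.natCast_div, Int.toNat_natCast]
    rw [List.map_map]
    have hmap : (List.range (((themes.length : Int) - 0 + bs - 1) / bs).toNat).map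
          ((fun start => PySem.List.slice themes (some start) (some (start + bs))) ∘ (fun k : Nat => 0 + bs * (k : Int)))
        = (List.range ((themes.length + m - 1) / m)).map (fun k => (themes.drop (m * k)).take m) := by
      rw [hcnt]
      refine List.map_congr_left ?_
      intro k _
      simp only [Function.comp_apply, hbsm, Int.zero_add]
      have h1 : (m : Int) * (k : Int) = ((m * k : Nat) : Int) := by push_cast; ring
      rw [h1, PySem.List.slice_natCast_add]
    rw [hmap, pv_sliceChunks m hm1 themes.length themes rfl]
    -- B side
    have hB := pv_bufFold m hm1 themes [] [] (by simpa using hm1)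
    simp only [List.nil_append] at hB
    rw [← hbsm] at hB
    simp only [List.nil_append] at hB ⊢
    exact hB.symm
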